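-- pv_equiv track=rewrite | github.com/MrBrantCode/unitest_baseline | mut_generate/mist_train_taco/taco_16316/solution.py | max_sum_subarray_with_skip
-- ===== SOURCE A (Python) =====
-- def max_sum_subarray_with_skip(arr, n):
--     if n == 0:
--         return 0
--
--     left = [0] * n
--     right = [0] * n
--
--     # Initialize the first element of left and the last element of right
--     left[0] = arr[0]
--     right[-1] = arr[-1]
--
--     # Fill the left array
--     for i in range(1, n):
--         left[i] = max(left[i - 1] + arr[i], arr[i])
--
--     # Fill the right array
--     for i in range(n - 2, -1, -1):
--         right[i] = max(right[i + 1] + arr[i], arr[i])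
--
--     # Initialize the answer with the maximum value in the left array
--     ans = max(left)
--
--     # Check the maximum sum by skipping at most one element
--     for i in range(1, n - 1):
--         ans = max(ans, left[i - 1] + right[i + 1])
--
--     return ans
-- ===== SOURCE B (Python) =====
-- def max_sum_subarray_with_skip(arr, n):
--     if n == 0:
--         return 0
--     best = no = arr[0]
--     one = None
--     for i in range(1, n):
--         x = arr[i]
--         one = no if one is None else max(one + x, no)
--         no = max(no + x, x)
--         best = max(max(best, no), one)
--     return best
-- ===== Notes on version B (the rewrite author's own statement) =====
-- stated objective: simpler
-- what changed: Replaces A's two allocated prefix/suffix Kadane arrays and its three extra passes (left fill, right fill, max, combine) by a single forward pass keeping two rolling scalars (best run without a deletion and best run with exactly one deletion) and a running answer; …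
-- outside the precondition, e.g. on max_sum_subarray_with_skip([1, -2, 3, 4], 3): A returns 5, B returns 4
import Mathlib
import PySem

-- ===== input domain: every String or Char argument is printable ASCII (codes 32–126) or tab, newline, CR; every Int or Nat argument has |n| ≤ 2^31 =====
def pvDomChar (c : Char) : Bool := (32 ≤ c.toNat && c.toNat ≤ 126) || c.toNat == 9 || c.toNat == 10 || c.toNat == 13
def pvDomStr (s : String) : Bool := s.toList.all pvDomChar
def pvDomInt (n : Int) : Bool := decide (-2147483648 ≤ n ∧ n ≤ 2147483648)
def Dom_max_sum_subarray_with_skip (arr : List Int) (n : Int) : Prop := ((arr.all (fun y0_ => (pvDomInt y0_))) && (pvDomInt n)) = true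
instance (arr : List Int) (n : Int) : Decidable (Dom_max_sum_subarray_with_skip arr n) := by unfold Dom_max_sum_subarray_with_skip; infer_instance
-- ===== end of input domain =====

-- B replaces A's two prefix/suffix arrays and three extra passes by one forward pass with two
-- rolling scalars (Kadane with at-most-one deletion); equivalence is proved on the natural
-- domain n = len(arr) (plus n ≤ 2, where A's suffix array is never read).

-- ===== PORT A =====
def max_sum_subarray_with_skip (arr : List Int) (n : Int) : Int :=
  if n = 0 then 0
  else
    -- left = [0]*n; left[0] = arr[0]
    let left0 := PySem.List.pySetD (PySem.List.pyRepeat ([0] : List Int) n) 0 (PySem.List.pyGetD arr 0 0)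
    -- right = [0]*n; right[-1] = arr[-1]
    let right0 := PySem.List.pySetD (PySem.List.pyRepeat ([0] : List Int) n) (-1) (PySem.List.pyGetD arr (-1) 0)
    -- for i in range(1, n): left[i] = max(left[i-1] + arr[i], arr[i])
    let left := (PySem.List.pyRange 1 n 1).foldl
      (fun L i => PySem.List.pySetD L i
        (max (PySem.List.pyGetD L (i - 1) 0 + PySem.List.pyGetD arr i 0) (PySem.List.pyGetD arr i 0)))
      left0
    -- for i in range(n - 2, -1, -1): right[i] = max(right[i+1] + arr[i], arr[i])
    let right := (PySem.List.pyRange (n - 2) (-1) (-1)).foldl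
      (fun R i => PySem.List.pySetD R i
        (max (PySem.List.pyGetD R (i + 1) 0 + PySem.List.pyGetD arr i 0) (PySem.List.pyGetD arr i 0)))
      right0
    -- ans = max(left)
    let ans0 := (PySem.List.max? left (fun x => x)).getD 0
    -- for i in range(1, n - 1): ans = max(ans, left[i-1] + right[i+1])
    (PySem.List.pyRange 1 (n - 1) 1).foldl
      (fun ans i => max ans (PySem.List.pyGetD left (i - 1) 0 + PySem.List.pyGetD right (i + 1) 0))
      ans0

-- ===== PORT B =====
-- loop body of Source B: state (best, no, one); one = no if one is None else max(one + x, no)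
def pvBStep (st : Int × Int × Option Int) (x : Int) : Int × Int × Option Int :=
  let one : Int := match st.2.2 with
    | none => st.2.1
    | some o => max (o + x) st.2.1
  let no := max (st.2.1 + x) x
  (max (max st.1 no) one, no, some one)

def max_sum_subarray_with_skip_alt (arr : List Int) (n : Int) : Int :=
  if n = 0 then 0
  else
    let a0 := PySem.List.pyGetD arr 0 0
    ((PySem.List.pyRange 1 n 1).foldl (fun st i => pvBStep st (PySem.List.pyGetD arr i 0)) (a0, a0, none)).1

-- ===== PRECONDITION & SPEC =====
-- Pre_ restricts to the natural domain: n = len(arr) (n is the array's length in the original task),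
-- kept also for n ≤ 2, where A provably never reads its suffix array.  It excludes 2 < n < len(arr):
-- there A seeds its suffix pass with arr[-1], the last element of the FULL list, so its value depends
-- on elements outside the first n and cannot be matched by any re-implementation of the first-n task;
-- it also excludes n < 0 and n > len(arr), where A raises IndexError.
def Pre_max_sum_subarray_with_skip (arr : List Int) (n : Int) : Prop :=
  0 ≤ n ∧ n ≤ (arr.length : Int) ∧ (n ≤ 2 ∨ n = (arr.length : Int))
instance (arr : List Int) (n : Int) : Decidable (Pre_max_sum_subarray_with_skip arr n) := by
  unfold Pre_max_sum_subarray_with_skip; infer_instance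
def pvWitness_max_sum_subarray_with_skip : List Int × Int := ([1, -2, 3, 4], 4)

def Spec_max_sum_subarray_with_skip (arr : List Int) (n : Int) (out : Int) : Prop := out = max_sum_subarray_with_skip_alt arr n
instance (arr : List Int) (n : Int) (out : Int) : Decidable (Spec_max_sum_subarray_with_skip arr n out) := by unfold Spec_max_sum_subarray_with_skip; infer_instance

-- ===== CLAIM (what is proved, stated in full; the proofs are below) =====
def Claim_equal_max_sum_subarray_with_skip : Prop := ∀ (arr : List Int) (n : Int), Dom_max_sum_subarray_with_skip arr n → Pre_max_sum_subarray_with_skip arr n → Spec_max_sum_subarray_with_skip arr n (max_sum_subarray_with_skip arr n)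


-- ===== LEMMAS AND PROOFS =====

-- ---- spec functions (A's arrays and B's rolling state, index-free) ----

-- Kadane "best sum ending here" carried forward: final value
def pvEL (c : Int) : List Int → Int
  | [] => c
  | x :: xs => pvEL (max (c + x) x) xs

-- running maximum of all "ending here" values (= max(left))
def pvME (c : Int) : List Int → Int
  | [] => c
  | x :: xs => max c (pvME (max (c + x) x) xs)

-- the tail of A's left array after the seed entry
def pvEC (c : Int) : List Int → List Int
  | [] => []
  | x :: xs => max (c + x) x :: pvEC (max (c + x) x) xs

-- A's left array
def pvES (c : Int) (t : List Int) : List Int := c :: pvEC c t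

-- A's right array on w with seed z (best sum starting here, seed at the end)
def pvRB : List Int → Int → List Int
  | [], z => [z]
  | x :: xs, z => max ((pvRB xs z).headD 0 + x) x :: pvRB xs z

-- suffix sums of w with seed z appended
def pvSS : List Int → Int → List Int
  | [], z => [z]
  | x :: xs, z => (x + (pvSS xs z).headD 0) :: pvSS xs z

-- assembled A-side data for the array a :: t
def pvR (a : Int) (t : List Int) : List Int :=
  pvRB ((a :: t).dropLast) ((a :: t).getLastD 0)
def pvSf (a : Int) (t : List Int) : List Int :=
  pvSS ((a :: t).dropLast) ((a :: t).getLastD 0)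
def pvCT (a : Int) (t : List Int) : List Int :=
  List.zipWith (· + ·) ((pvES a t).dropLast.dropLast) ((pvR a t).drop 2)
def pvW (a : Int) (t : List Int) : List Int :=
  List.zipWith (· + ·) ((pvES a t).dropLast.dropLast) ((pvSf a t).drop 2)
def pvV (a : Int) (t : List Int) : Int := List.foldl max (pvME a t) (pvCT a t)
def pvPs (a : Int) (t : List Int) : Int :=
  List.foldl max (((pvES a t).dropLast).getLastD 0) (pvW a t)

-- ---- generic list/max helpers ----

theorem aux_set_last {v : Int} : ∀ (l : List Int), l ≠ [] → l.set (l.length - 1) v = l.dropLast ++ [v]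
  | [], h => absurd rfl h
  | [_], _ => rfl
  | x :: y :: ys, _ => by
    have ih := aux_set_last (v := v) (y :: ys) (by simp)
    simp only [List.length_cons, List.dropLast_cons₂, List.cons_append, Nat.add_sub_cancel] at ih ⊢
    rw [List.set_cons_succ, ih]

theorem pySetD_neg_one (l : List Int) (v : Int) (h : l ≠ []) :
    PySem.List.pySetD l (-1) v = l.dropLast ++ [v] := by
  have hl : 1 ≤ l.length := List.length_pos_iff.mpr h
  simp only [PySem.List.pySetD, PySem.List.pySet?, PySem.List.pyIdx?]
  rw [if_neg (by omega), if_pos (by omega)]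
  simp only [Option.map_some, Option.getD_some]
  rw [show (- -(1:Int)).toNat = 1 from rfl, aux_set_last l h]

theorem aux_dropLast_getLastD (l : List Int) (h : l ≠ []) :
    l = l.dropLast ++ [l.getLastD 0] := by
  conv_lhs => rw [← List.dropLast_concat_getLast h]
  have h2 : l.getLast? = some (l.getLast h) := List.getLast?_eq_some_getLast h
  rw [List.getLastD_eq_getLast?, h2]; rfl

theorem pvSS_ne_nil (w : List Int) (z : Int) : pvSS w z ≠ [] := by
  cases w <;> simp [pvSS]

theorem pvRB_ne_nil (w : List Int) (z : Int) : pvRB w z ≠ [] := by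
  cases w <;> simp [pvRB]

theorem headD_append (l r : List Int) (h : l ≠ []) : (l ++ r).headD 0 = l.headD 0 := by
  cases l with
  | nil => exact absurd rfl h
  | cons x t => rfl

theorem headD_map_add (l : List Int) (x : Int) (h : l ≠ []) :
    (l.map (· + x)).headD 0 = l.headD 0 + x := by
  cases l with
  | nil => exact absurd rfl h
  | cons y t => rfl

theorem headD_zipWith_max (l r : List Int) (hl : l ≠ []) (hr : r ≠ []) :
    (List.zipWith max l r).headD 0 = max (l.headD 0) (r.headD 0) := by
  cases l with
  | nil => exact absurd rfl hl
  | cons x t =>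
    cases r with
    | nil => exact absurd rfl hr
    | cons y s => rfl

theorem hmax_comm (l : List Int) : ∀ (a b : Int),
    List.foldl max (max a b) l = max a (List.foldl max b l) := by
  induction l with
  | nil => intro a b; rfl
  | cons x t ih =>
    intro a b
    simp only [List.foldl_cons]
    rw [show max (max a b) x = max a (max b x) from by omega, ih]

theorem hmax_out (l : List Int) (a b : Int) :
    max (List.foldl max a l) b = List.foldl max (max a b) l := by
  rw [show max a b = max b a from by omega, hmax_comm]; omega

theorem hmax_snoc (l : List Int) (a y : Int) :
    List.foldl max a (l ++ [y]) = max (List.foldl max a l) y := by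
  rw [List.foldl_append]; rfl

theorem hmax_map_add (l : List Int) : ∀ (a x : Int),
    List.foldl max (a + x) (l.map (· + x)) = List.foldl max a l + x := by
  induction l with
  | nil => intro a x; rfl
  | cons y t ih =>
    intro a x
    simp only [List.map_cons, List.foldl_cons]
    rw [show max (a + x) (y + x) = max a y + x from by omega, ih]

theorem hmax_zip : ∀ (l1 l2 : List Int), l1.length = l2.length → ∀ (a b : Int),
    List.foldl max (max a b) (List.zipWith max l1 l2) =
      max (List.foldl max a l1) (List.foldl max b l2)
  | [], [], _, a, b => rfl
  | x :: t1, y :: t2, h, a, b => by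
    simp only [List.zipWith_cons_cons, List.foldl_cons]
    rw [show max (max a b) (max x y) = max (max a x) (max b y) from by omega,
      hmax_zip t1 t2 (by simpa using h)]
  | [], _ :: _, h, _, _ => by simp at h
  | _ :: _, [], h, _, _ => by simp at h

theorem zip_add_max : ∀ (E R S : List Int),
    List.zipWith (· + ·) E (List.zipWith max R S) =
      List.zipWith max (List.zipWith (· + ·) E R) (List.zipWith (· + ·) E S)
  | [], _, _ => rfl
  | _ :: _, [], _ => rfl
  | _ :: _, _ :: _, [] => rfl
  | e :: E, r :: R, s :: S => by
    simp only [List.zipWith_cons_cons]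
    rw [zip_add_max E R S, show e + max r s = max (e + r) (e + s) from by omega]

theorem zip_add_map : ∀ (E S : List Int) (x : Int),
    List.zipWith (· + ·) E (S.map (· + x)) = (List.zipWith (· + ·) E S).map (· + x)
  | [], _, _ => rfl
  | _ :: _, [], _ => rfl
  | e :: E, s :: S, x => by
    simp only [List.map_cons, List.zipWith_cons_cons]
    rw [zip_add_map E S x, show e + (s + x) = e + s + x from by omega]

theorem hfold_max_map (g : Int → Int) : ∀ (l : List Int) (i : Int),
    l.foldl (fun acc j => max acc (g j)) i = List.foldl max i (l.map g)
  | [], _ => rfl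
  | x :: t, i => by
    simp only [List.map_cons, List.foldl_cons]
    exact hfold_max_map g t (max i (g x))

-- ---- basic facts about the spec functions ----

theorem length_pvEC : ∀ (t : List Int) (c : Int), (pvEC c t).length = t.length
  | [], _ => rfl
  | x :: xs, c => by simp [pvEC, length_pvEC xs]

theorem length_pvES (c : Int) (t : List Int) : (pvES c t).length = t.length + 1 := by
  simp [pvES, length_pvEC]

theorem length_pvRB : ∀ (w : List Int) (z : Int), (pvRB w z).length = w.length + 1
  | [], _ => rfl
  | x :: xs, z => by simp [pvRB, length_pvRB xs]

theorem length_pvSS : ∀ (w : List Int) (z : Int), (pvSS w z).length = w.length + 1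
  | [], _ => rfl
  | x :: xs, z => by simp [pvSS, length_pvSS xs]

theorem pvEC_snoc : ∀ (t : List Int) (c x : Int),
    pvEC c (t ++ [x]) = pvEC c t ++ [max (pvEL c t + x) x]
  | [], c, x => rfl
  | y :: ys, c, x => by
    simp only [List.cons_append, pvEC, pvEL, List.cons_append]
    rw [pvEC_snoc ys]

theorem pvES_snoc (c x : Int) (t : List Int) :
    pvES c (t ++ [x]) = pvES c t ++ [max (pvEL c t + x) x] := by
  simp [pvES, pvEC_snoc]

theorem pvEL_snoc : ∀ (t : List Int) (c x : Int),
    pvEL c (t ++ [x]) = max (pvEL c t + x) x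
  | [], _, _ => rfl
  | y :: ys, c, x => by simp only [List.cons_append, pvEL]; rw [pvEL_snoc ys]

theorem pvME_snoc : ∀ (t : List Int) (c x : Int),
    pvME c (t ++ [x]) = max (pvME c t) (max (pvEL c t + x) x)
  | [], _, _ => rfl
  | y :: ys, c, x => by
    simp only [List.cons_append, pvME, pvEL]
    rw [pvME_snoc ys]; omega

theorem pvSS_snoc : ∀ (w : List Int) (z x : Int),
    pvSS (w ++ [z]) x = (pvSS w z).map (· + x) ++ [x]
  | [], z, x => by simp [pvSS]
  | y :: ys, z, x => by
    simp only [List.cons_append, pvSS, List.map_cons, List.cons_append]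
    rw [pvSS_snoc ys z x]
    rw [headD_append _ _ (by simp [pvSS_ne_nil]),
      headD_map_add _ _ (pvSS_ne_nil ys z)]
    rw [show y + ((pvSS ys z).headD 0 + x) = y + (pvSS ys z).headD 0 + x from by omega]

theorem pvRB_snoc : ∀ (w : List Int) (z x : Int),
    pvRB (w ++ [z]) x = List.zipWith max (pvRB w z) ((pvSS w z).map (· + x)) ++ [x]
  | [], z, x => by simp [pvRB, pvSS]; omega
  | y :: ys, z, x => by
    simp only [List.cons_append, pvRB, pvSS, List.map_cons, List.zipWith_cons_cons,
      List.cons_append]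
    rw [pvRB_snoc ys z x]
    have hz : List.zipWith max (pvRB ys z) ((pvSS ys z).map (· + x)) ≠ [] := by
      have h1 := length_pvRB ys z
      have h2 := length_pvSS ys z
      intro h
      have := congrArg List.length h
      simp [List.length_zipWith, h1, h2] at this
    rw [headD_append _ _ hz,
      headD_zipWith_max _ _ (pvRB_ne_nil ys z) (by simp [pvSS_ne_nil]),
      headD_map_add _ _ (pvSS_ne_nil ys z)]
    congr 1
    omega

theorem pvME_eq_fold : ∀ (t : List Int) (c : Int),
    List.foldl max c (pvEC c t) = pvME c t
  | [], _ => rfl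
  | x :: xs, c => by
    simp only [pvEC, pvME, List.foldl_cons]
    rw [hmax_comm, pvME_eq_fold xs]

theorem pvEL_le_pvME : ∀ (t : List Int) (c : Int), pvEL c t ≤ pvME c t
  | [], _ => le_refl _
  | x :: xs, c => by
    simp only [pvEL, pvME]
    have := pvEL_le_pvME xs (max (c + x) x)
    omega

theorem pvES_getLast (t : List Int) (c : Int) : (pvES c t).getLastD 0 = pvEL c t := by
  induction t generalizing c with
  | nil => rfl
  | cons x xs ih =>
    simp only [pvES, pvEL] at *
    cases hx : pvEC (max (c + x) x) xs with
    | nil => cases xs with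
      | nil => simp [pvEC] at hx ⊢; rfl
      | cons y ys => simp [pvEC] at hx
    | cons h tl =>
      have := ih (max (c + x) x)
      rw [hx] at this
      simp [pvEC, hx] at this ⊢
      exact this

-- ---- the key snoc lemmas for the assembled A-side data ----


-- decomposition of the snoc'd A-side data, shared by pvPs_snoc and pvV_snoc
theorem pvSf_snoc (a x : Int) (t : List Int) :
    pvSf a (t ++ [x]) = (pvSf a t).map (· + x) ++ [x] := by
  unfold pvSf
  rw [show a :: (t ++ [x]) = (a :: t) ++ [x] from rfl, List.dropLast_concat,
    List.getLastD_concat]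
  conv_lhs => rw [aux_dropLast_getLastD (a :: t) (by simp)]
  rw [pvSS_snoc]

theorem pvR_snoc (a x : Int) (t : List Int) :
    pvR a (t ++ [x]) =
      List.zipWith max (pvR a t) ((pvSf a t).map (· + x)) ++ [x] := by
  unfold pvR pvSf
  rw [show a :: (t ++ [x]) = (a :: t) ++ [x] from rfl, List.dropLast_concat,
    List.getLastD_concat]
  conv_lhs => rw [aux_dropLast_getLastD (a :: t) (by simp)]
  rw [pvRB_snoc]

theorem length_pvR (a : Int) (t : List Int) : (pvR a t).length = t.length + 1 := by
  unfold pvR; rw [length_pvRB]; simp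

theorem length_pvSf (a : Int) (t : List Int) : (pvSf a t).length = t.length + 1 := by
  unfold pvSf; rw [length_pvSS]; simp

theorem pvW_snoc (a u x : Int) (s : List Int) :
    pvW a ((u :: s) ++ [x]) =
      (pvW a (u :: s)).map (· + x) ++ [((pvES a (u :: s)).dropLast).getLastD 0 + x] := by
  unfold pvW
  rw [pvES_snoc, List.dropLast_concat, pvSf_snoc]
  rw [List.drop_append_of_le_length (by rw [List.length_map, length_pvSf]; simp),
    ← List.map_drop]
  have hEd : (pvES a (u :: s)).dropLast ≠ [] := by
    intro h
    have := congrArg List.length h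
    rw [List.length_dropLast, length_pvES] at this
    simp at this
  conv_lhs => rw [aux_dropLast_getLastD _ hEd]
  rw [List.zipWith_append (by
    rw [List.length_dropLast, List.length_dropLast, length_pvES,
      List.length_map, List.length_drop, length_pvSf]
    simp)]
  rw [zip_add_map]
  rfl

theorem pvPs_snoc (a u x : Int) (s : List Int) :
    pvPs a ((u :: s) ++ [x]) = max (pvPs a (u :: s) + x) (pvEL a (u :: s)) := by
  unfold pvPs
  rw [pvES_snoc, List.dropLast_concat, pvES_getLast, pvW_snoc]
  rw [hmax_snoc, ← hmax_map_add, hmax_out, hmax_out]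
  rw [max_comm (pvEL a (u :: s)) _]

theorem pvCT_snoc (a u x : Int) (s : List Int) :
    pvCT a ((u :: s) ++ [x]) =
      List.zipWith max (pvCT a (u :: s)) ((pvW a (u :: s)).map (· + x)) ++
        [((pvES a (u :: s)).dropLast).getLastD 0 + x] := by
  unfold pvCT
  rw [pvES_snoc, List.dropLast_concat, pvR_snoc]
  rw [List.drop_append_of_le_length (by
    rw [List.length_zipWith, length_pvR, List.length_map, length_pvSf]; simp)]
  rw [List.drop_zipWith, ← List.map_drop]
  have hEd : (pvES a (u :: s)).dropLast ≠ [] := by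
    intro h
    have := congrArg List.length h
    rw [List.length_dropLast, length_pvES] at this
    simp at this
  conv_lhs => rw [aux_dropLast_getLastD _ hEd]
  rw [List.zipWith_append (by
    simp [List.length_zipWith, List.length_drop, List.length_map,
      length_pvR, length_pvSf, length_pvES])]
  rw [zip_add_max, zip_add_map]
  rfl

theorem pvV_snoc (a u x : Int) (s : List Int) :
    pvV a ((u :: s) ++ [x]) =
      max (pvV a (u :: s)) (max (max (pvEL a (u :: s) + x) x) (pvPs a (u :: s) + x)) := by
  unfold pvV
  rw [pvME_snoc, pvCT_snoc, hmax_snoc]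
  rw [hmax_zip _ _ (by
    simp [pvCT, pvW, List.length_zipWith, length_pvR, length_pvSf])]
  unfold pvPs
  rw [← hmax_map_add]
  have hb : max (List.foldl max (max (pvEL a (u :: s) + x) x)
        ((pvW a (u :: s)).map (· + x))) (((pvES a (u :: s)).dropLast).getLastD 0 + x) =
      max (max (pvEL a (u :: s) + x) x)
        (List.foldl max (((pvES a (u :: s)).dropLast).getLastD 0 + x)
          ((pvW a (u :: s)).map (· + x))) := by
    rw [hmax_out, hmax_comm]
  generalize hF1 : List.foldl max (pvME a (u :: s)) (pvCT a (u :: s)) = F1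
  generalize hF2 : List.foldl max (max (pvEL a (u :: s) + x) x)
      ((pvW a (u :: s)).map (· + x)) = F2
  generalize hF3 : List.foldl max (((pvES a (u :: s)).dropLast).getLastD 0 + x)
      ((pvW a (u :: s)).map (· + x)) = F3
  rw [hF2, hF3] at hb
  omega

theorem pvEL_le_pvV (a : Int) (t : List Int) : pvEL a t ≤ pvV a t := by
  have h1 := pvEL_le_pvME t a
  have h2 := (PySem.List.le_foldl_max (pvCT a t) (pvME a t)).1
  unfold pvV; omega

-- ---- B's loop equals the assembled A-side value ----

theorem main_b (a : Int) (u : Int) (s : List Int) :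
    List.foldl pvBStep (a, a, none) (u :: s) =
      (pvV a (u :: s), pvEL a (u :: s), some (pvPs a (u :: s))) := by
  induction s using List.reverseRecOn with
  | nil =>
    show pvBStep (a, a, none) u = _
    unfold pvBStep pvV pvEL pvPs pvME pvCT pvW pvES pvEC
    simp only []
    refine Prod.ext ?_ (Prod.ext ?_ ?_)
    · show max (max a (max (a + u) u)) a = List.foldl max (max a (pvME (max (a+u) u) [])) _
      unfold pvME
      show max (max a (max (a + u) u)) a = List.foldl max (max a (max (a+u) u)) (List.zipWith _ ([a].dropLast) _)
      norm_num
    · rfl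
    · rfl
  | append_singleton s' x ih =>
    rw [show u :: (s' ++ [x]) = (u :: s') ++ [x] from rfl, List.foldl_append, ih]
    show pvBStep _ x = _
    unfold pvBStep
    simp only []
    rw [pvV_snoc, pvPs_snoc, pvEL_snoc]
    refine Prod.ext ?_ (Prod.ext rfl ?_)
    · show max (max (pvV a (u :: s')) (max (pvEL a (u :: s') + x) x))
          (max (pvPs a (u :: s') + x) (pvEL a (u :: s'))) = _
      have hle := pvEL_le_pvV a (u :: s')
      generalize pvV a (u :: s') = V at *
      generalize pvEL a (u :: s') = L at *
      generalize pvPs a (u :: s') = P at *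
      omega
    · rfl

-- ---- port characterizations ----

-- A's left-array loop: forward filling of the Kadane scan
theorem aux_getD_append_last (P rest : List Int) (h : P ≠ []) :
    (P ++ rest).getD (P.length - 1) 0 = P.getLastD 0 := by
  have hl : 1 ≤ P.length := List.length_pos_iff.mpr h
  rw [List.getD, List.getElem?_append_left (by omega), List.getLastD_eq_getLast?,
    List.getLast?_eq_getElem?]

theorem aux_getD_append (l₁ l₂ : List Int) (k : Nat) :
    (l₁ ++ l₂).getD (l₁.length + k) 0 = l₂.getD k 0 := by
  simp [List.getD, List.getElem?_append_right]

theorem aux_getD_zero_headD (l : List Int) : l.getD 0 0 = l.headD 0 := by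
  cases l <;> rfl

theorem left_go (ys : List Int) : ∀ (s : List Int) (P : List Int) (c : Int), P ≠ [] →
    P.getLastD 0 = c → ys.drop P.length = s →
    (PySem.List.pyRange (P.length : Int) (ys.length : Int) 1).foldl
      (fun L i => PySem.List.pySetD L i
        (max (PySem.List.pyGetD L (i - 1) 0 + PySem.List.pyGetD ys i 0)
          (PySem.List.pyGetD ys i 0)))
      (P ++ List.replicate s.length 0) = P ++ pvEC c s := by
  intro s
  induction s with
  | nil =>
    intro P c _ _ hdrop
    rw [PySem.List.pyRange_one_eq_nil (by
      have := List.drop_eq_nil_iff.mp hdrop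
      exact_mod_cast this)]
    simp [pvEC]
  | cons x s' ih =>
    intro P c hne hlast hdrop
    have hlt : P.length < ys.length := by
      by_contra hge
      rw [List.drop_eq_nil_iff.mpr (by omega)] at hdrop
      exact List.cons_ne_nil x s' hdrop.symm
    rw [PySem.List.pyRange_one_cons (by exact_mod_cast hlt), List.foldl_cons]
    have hx : PySem.List.pyGetD ys (P.length : Int) 0 = x := by
      rw [PySem.List.pyGetD_natCast, List.getD]
      have : ys[P.length]? = some x := by
        have h0 : (ys.drop P.length)[0]? = some x := by rw [hdrop]; rfl
        rwa [List.getElem?_drop, Nat.add_zero] at h0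
      rw [this]; rfl
    have hc : PySem.List.pyGetD (P ++ List.replicate (x :: s').length 0)
        ((P.length : Int) - 1) 0 = c := by
      have hl : 1 ≤ P.length := List.length_pos_iff.mpr hne
      rw [show ((P.length : Int) - 1) = ((P.length - 1 : Nat) : Int) from by push_cast [hl]; omega,
        PySem.List.pyGetD_natCast, aux_getD_append_last _ _ hne, hlast]
    rw [hc, hx]
    rw [PySem.List.pySetD_natCast]
    rw [show List.replicate (x :: s').length (0 : Int) = (0:Int) :: List.replicate s'.length 0 from rfl]
    rw [show (P ++ (0:Int) :: List.replicate s'.length 0).set P.length (max (c + x) x)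
        = (P ++ [max (c + x) x]) ++ List.replicate s'.length 0 from by simp]
    have := ih (P ++ [max (c + x) x]) (max (c + x) x) (by simp)
      (by simp) (by rw [List.length_append, List.length_singleton, ← List.tail_drop, hdrop]; rfl)
    rw [List.length_append, List.length_singleton] at this
    rw [show ((P.length : Int) + 1) = ((P.length + 1 : Nat) : Int) from by push_cast; ring] at *
    rw [this, List.append_assoc, List.singleton_append]
    rfl

-- A's right-array loop: backward filling from the seed
theorem right_go (ys : List Int) (z : Int) : ∀ (pre sfx : List Int),
    ys = (pre ++ sfx) ++ [z] →
    (PySem.List.pyRange ((pre.length : Int) - 1) (-1) (-1)).foldl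
      (fun R i => PySem.List.pySetD R i
        (max (PySem.List.pyGetD R (i + 1) 0 + PySem.List.pyGetD ys i 0)
          (PySem.List.pyGetD ys i 0)))
      (List.replicate pre.length 0 ++ pvRB sfx z) = pvRB (pre ++ sfx) z := by
  intro pre
  induction pre using List.reverseRecOn with
  | nil =>
    intro sfx _
    rw [show ((([] : List Int).length : Int) - 1) = -1 from by simp,
      PySem.List.pyRange_neg_one_eq_nil (by omega)]
    simp
  | append_singleton q y ih =>
    intro sfx hys
    rw [show (((q ++ [y]).length : Int) - 1) = (q.length : Int) from by simp,
      PySem.List.pyRange_neg_one_cons (by omega), List.foldl_cons]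
    have hyy : PySem.List.pyGetD ys (q.length : Int) 0 = y := by
      rw [PySem.List.pyGetD_natCast, hys,
        show (q ++ [y]) ++ sfx ++ [z] = q ++ (y :: (sfx ++ [z])) from by simp,
        show q.length = q.length + 0 from rfl, aux_getD_append]
      rfl
    have hstate : List.replicate (q ++ [y]).length (0 : Int) ++ pvRB sfx z
        = List.replicate q.length 0 ++ (0 :: pvRB sfx z) := by
      rw [List.length_append, List.length_singleton, List.replicate_succ',
        List.append_assoc, List.singleton_append]
    rw [hstate]
    have hr : PySem.List.pyGetD (List.replicate q.length 0 ++ (0 :: pvRB sfx z))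
        ((q.length : Int) + 1) 0 = (pvRB sfx z).headD 0 := by
      rw [show ((q.length : Int) + 1) = ((q.length + 1 : Nat) : Int) from by push_cast; ring,
        PySem.List.pyGetD_natCast,
        show q.length + 1 = (List.replicate q.length (0:Int)).length + 1 from by simp,
        aux_getD_append]
      rw [show (1 : Nat) = 0 + 1 from rfl, List.getD_cons_succ, aux_getD_zero_headD]
    rw [hyy, hr, PySem.List.pySetD_natCast]
    rw [show (List.replicate q.length (0:Int) ++ (0 :: pvRB sfx z)).set q.length
        (max ((pvRB sfx z).headD 0 + y) y)
        = List.replicate q.length 0 ++ (max ((pvRB sfx z).headD 0 + y) y :: pvRB sfx z) from by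
      rw [show q.length = (List.replicate q.length (0:Int)).length from by simp]
      simp]
    have := ih (y :: sfx) (by rw [hys]; simp)
    rw [show (max ((pvRB sfx z).headD 0 + y) y :: pvRB sfx z) = pvRB (y :: sfx) z from rfl,
      this]
    simp

theorem portA_char (a : Int) (t : List Int) :
    max_sum_subarray_with_skip (a :: t) ((a :: t).length : Int) = pvV a t := by
  have hne : (a :: t) ≠ [] := by simp
  unfold max_sum_subarray_with_skip
  rw [if_neg (by simp; omega)]
  show (PySem.List.pyRange 1 (((a :: t).length : Int) - 1) 1).foldl
      (fun ans i => max ans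
        (PySem.List.pyGetD ((PySem.List.pyRange 1 ((a :: t).length : Int) 1).foldl
            (fun L i => PySem.List.pySetD L i
              (max (PySem.List.pyGetD L (i - 1) 0 + PySem.List.pyGetD (a :: t) i 0)
                (PySem.List.pyGetD (a :: t) i 0)))
            (PySem.List.pySetD (PySem.List.pyRepeat ([0] : List Int) ((a :: t).length : Int)) 0
              (PySem.List.pyGetD (a :: t) 0 0))) (i - 1) 0 +
          PySem.List.pyGetD ((PySem.List.pyRange (((a :: t).length : Int) - 2) (-1) (-1)).foldl
            (fun R i => PySem.List.pySetD R i
              (max (PySem.List.pyGetD R (i + 1) 0 + PySem.List.pyGetD (a :: t) i 0)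
                (PySem.List.pyGetD (a :: t) i 0)))
            (PySem.List.pySetD (PySem.List.pyRepeat ([0] : List Int) ((a :: t).length : Int)) (-1)
              (PySem.List.pyGetD (a :: t) (-1) 0))) (i + 1) 0))
      ((PySem.List.max? ((PySem.List.pyRange 1 ((a :: t).length : Int) 1).foldl
            (fun L i => PySem.List.pySetD L i
              (max (PySem.List.pyGetD L (i - 1) 0 + PySem.List.pyGetD (a :: t) i 0)
                (PySem.List.pyGetD (a :: t) i 0)))
            (PySem.List.pySetD (PySem.List.pyRepeat ([0] : List Int) ((a :: t).length : Int)) 0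
              (PySem.List.pyGetD (a :: t) 0 0))) (fun x => x)).getD 0)
    = pvV a t
  -- the left array
  have hL0 : PySem.List.pySetD (PySem.List.pyRepeat ([0] : List Int) ((a :: t).length : Int)) 0
      (PySem.List.pyGetD (a :: t) 0 0) = [a] ++ List.replicate t.length 0 := by
    rw [PySem.List.pyRepeat_singleton, PySem.List.pyGetD_zero_cons,
      PySem.List.pySetD_of_nonneg _ _ (by omega : (0:Int) ≤ 0)]
    simp [List.replicate_succ]
  have hL : (PySem.List.pyRange 1 ((a :: t).length : Int) 1).foldl
      (fun L i => PySem.List.pySetD L i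
        (max (PySem.List.pyGetD L (i - 1) 0 + PySem.List.pyGetD (a :: t) i 0)
          (PySem.List.pyGetD (a :: t) i 0)))
      (PySem.List.pySetD (PySem.List.pyRepeat ([0] : List Int) ((a :: t).length : Int)) 0
        (PySem.List.pyGetD (a :: t) 0 0)) = pvES a t := by
    have hlg := left_go (a :: t) t [a] a (by simp) rfl rfl
    rw [show (([a] : List Int).length : Int) = 1 from by simp] at hlg
    rw [hL0, hlg]
    rfl
  -- the right array
  have hzl : PySem.List.pyGetD (a :: t) (-1) 0 = (a :: t).getLastD 0 := by
    rw [PySem.List.pyGetD_neg_one _ _ hne, List.getLastD_eq_getLast?,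
      List.getLast?_eq_some_getLast hne]
    rfl
  have hR0 : PySem.List.pySetD (PySem.List.pyRepeat ([0] : List Int) ((a :: t).length : Int)) (-1)
      (PySem.List.pyGetD (a :: t) (-1) 0)
      = List.replicate ((a :: t).dropLast).length 0 ++ pvRB [] ((a :: t).getLastD 0) := by
    rw [PySem.List.pyRepeat_singleton, hzl, pySetD_neg_one _ _ (by simp)]
    show (List.replicate (t.length + 1) (0:Int)).dropLast ++ _ = _
    rw [List.replicate_succ', List.dropLast_concat]
    simp [pvRB]
  have hR : (PySem.List.pyRange (((a :: t).length : Int) - 2) (-1) (-1)).foldl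
      (fun R i => PySem.List.pySetD R i
        (max (PySem.List.pyGetD R (i + 1) 0 + PySem.List.pyGetD (a :: t) i 0)
          (PySem.List.pyGetD (a :: t) i 0)))
      (PySem.List.pySetD (PySem.List.pyRepeat ([0] : List Int) ((a :: t).length : Int)) (-1)
        (PySem.List.pyGetD (a :: t) (-1) 0)) = pvR a t := by
    rw [hR0, show (((a :: t).length : Int) - 2) = ((((a :: t).dropLast).length : Int) - 1) from by
      simp; omega]
    rw [right_go (a :: t) ((a :: t).getLastD 0) ((a :: t).dropLast) [] (by
      rw [List.append_nil]; exact aux_dropLast_getLastD _ hne)]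
    rw [List.append_nil]
    rfl
  rw [hL, hR]
  -- ans = max(left)
  have hans : (PySem.List.max? (pvES a t) (fun x => x)).getD 0 = pvME a t := by
    show (PySem.List.max? (a :: pvEC a t) (fun x => x)).getD 0 = pvME a t
    rw [PySem.List.max?_id_cons, Option.getD_some, pvME_eq_fold]
  rw [hans]
  -- the combine loop
  rw [hfold_max_map (fun i => PySem.List.pyGetD (pvES a t) (i - 1) 0 +
    PySem.List.pyGetD (pvR a t) (i + 1) 0)]
  have hmap : (PySem.List.pyRange 1 (((a :: t).length : Int) - 1) 1).map
      (fun i => PySem.List.pyGetD (pvES a t) (i - 1) 0 +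
        PySem.List.pyGetD (pvR a t) (i + 1) 0) = pvCT a t := by
    apply List.ext_getElem
    · rw [List.length_map, PySem.List.length_pyRange_one]
      simp [pvCT, List.length_zipWith, List.length_dropLast, length_pvES, length_pvR]
      try omega
    · intro k h1 h2
      rw [List.length_map, PySem.List.length_pyRange_one] at h1
      have hk : k < t.length - 1 := by
        simp at h1; omega
      rw [List.getElem_map, PySem.List.getElem_pyRange_one]
      rw [show (1 + (k : Int)) - 1 = ((k : Nat) : Int) from by ring,
        show (1 + (k : Int)) + 1 = (((2 + k : Nat)) : Int) from by push_cast; ring]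
      rw [PySem.List.pyGetD_natCast, PySem.List.pyGetD_natCast]
      rw [List.getD_eq_getElem _ _ (by rw [length_pvES]; omega),
        List.getD_eq_getElem _ _ (by rw [length_pvR]; omega)]

      show _ = (List.zipWith (· + ·) ((pvES a t).dropLast.dropLast) ((pvR a t).drop 2))[k]'h2
      rw [List.getElem_zipWith]
      rw [List.getElem_dropLast, List.getElem_dropLast, List.getElem_drop]
  rw [hmap]
  rfl

theorem portB_char (a : Int) (t : List Int) :
    max_sum_subarray_with_skip_alt (a :: t) ((a :: t).length : Int) =
      (List.foldl pvBStep (a, a, none) t).1 := by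
  unfold max_sum_subarray_with_skip_alt
  rw [if_neg (by simp; omega)]
  show (List.foldl (fun st i => pvBStep st (PySem.List.pyGetD (a :: t) i 0))
      (PySem.List.pyGetD (a :: t) 0 0, PySem.List.pyGetD (a :: t) 0 0, none)
      (PySem.List.pyRange 1 ((a :: t).length : Int))).1 = _
  rw [PySem.List.foldl_pyRange_pyGetD' (a := 1) (a :: t) 0 pvBStep _ (by omega)]
  rw [show ((1 : Int)).toNat = 1 from rfl, List.drop_one, List.tail_cons,
    PySem.List.pyGetD_zero_cons]

theorem edge_one (arr : List Int) :
    max_sum_subarray_with_skip arr 1 = max_sum_subarray_with_skip_alt arr 1 := rfl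

theorem edge_two (arr : List Int) :
    max_sum_subarray_with_skip arr 2 = max_sum_subarray_with_skip_alt arr 2 := by
  show (PySem.List.max? [PySem.List.pyGetD arr 0 0,
      max (PySem.List.pyGetD arr 0 0 + PySem.List.pyGetD arr 1 0) (PySem.List.pyGetD arr 1 0)]
      (fun x => x)).getD 0
    = max (max (PySem.List.pyGetD arr 0 0)
        (max (PySem.List.pyGetD arr 0 0 + PySem.List.pyGetD arr 1 0) (PySem.List.pyGetD arr 1 0)))
      (PySem.List.pyGetD arr 0 0)
  rw [PySem.List.max?_id_cons, Option.getD_some]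
  show max (PySem.List.pyGetD arr 0 0)
      (max (PySem.List.pyGetD arr 0 0 + PySem.List.pyGetD arr 1 0) (PySem.List.pyGetD arr 1 0)) = _
  omega


-- ===== VERDICT (by name: the statement is the Claim_ definition above) =====
theorem max_sum_subarray_with_skip_spec : Claim_equal_max_sum_subarray_with_skip := by
  intro arr n _ hpre
  obtain ⟨h0, hlen, hd⟩ := hpre
  unfold Spec_max_sum_subarray_with_skip
  by_cases hn : n = (arr.length : Int)
  · subst hn
    match arr with
    | [] => rfl
    | a :: [] => simpa using edge_one [a]
    | a :: u :: s =>
      rw [portA_char, portB_char, main_b]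
  · rcases hd with hd | hd
    · interval_cases n
      · rfl
      · exact edge_one arr
      · exact edge_two arr
    · exact absurd hd hn
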